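-- pv_equiv track=rewrite | github.com/VasiliyZakharov/- | poetry_analyzer.py | transliterate_word
-- ===== SOURCE A (Python) =====
-- def create_translit_mapping():
--     return [
--         ('shch', 'щ'), ('sch', 'щ'), ('ch', 'ч'), ('zh', 'ж'),
--         ('kh', 'х'), ('ts', 'ц'), ('yu', 'ю'), ('ya', 'я'),
--         ('yo', 'ё'), ('sh', 'ш'), ('je', 'ж'), ('ii', 'ый'),
--         ('iy', 'ий'), ('a', 'а'), ('b', 'б'), ('v', 'в'),
--         ('g', 'г'), ('d', 'д'), ('e', 'е'), ('z', 'з'),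
--         ('i', 'и'), ('y', 'й'), ('k', 'к'), ('l', 'л'),
--         ('m', 'м'), ('n', 'н'), ('o', 'о'), ('p', 'п'),
--         ('r', 'р'), ('s', 'с'), ('t', 'т'), ('u', 'у'),
--         ('f', 'ф'), ('h', 'х'), ('c', 'ц'), ('j', 'дж'),
--         ('q', 'к'), ('x', 'кс'), ('w', 'в'), ("'", 'ь'),
--         ('"', 'ъ'),
--     ]
--
-- def transliterate_word(word: str) -> str:
--     mapping = create_translit_mapping()
--     mapping.sort(key=lambda x: (-len(x[0]), x[0]))
--     result = []
--     pos = 0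
--     while pos < len(word):
--         match = None
--         for key, value in mapping:
--             if word.lower().startswith(key, pos):
--                 match = (key, value)
--                 break
--         if match:
--             result.append(match[1])
--             pos += len(match[0])
--         else:
--             result.append(word[pos])
--             pos += 1
--     return ''.join(result)
-- ===== SOURCE B (Python) =====
-- _PAIRS = [
--     ('shch', 'щ'), ('sch', 'щ'), ('ch', 'ч'), ('zh', 'ж'),
--     ('kh', 'х'), ('ts', 'ц'), ('yu', 'ю'), ('ya', 'я'),
--     ('yo', 'ё'), ('sh', 'ш'), ('je', 'ж'), ('ii', 'ый'),
--     ('iy', 'ий'), ('a', 'а'), ('b', 'б'), ('v', 'в'),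
--     ('g', 'г'), ('d', 'д'), ('e', 'е'), ('z', 'з'),
--     ('i', 'и'), ('y', 'й'), ('k', 'к'), ('l', 'л'),
--     ('m', 'м'), ('n', 'н'), ('o', 'о'), ('p', 'п'),
--     ('r', 'р'), ('s', 'с'), ('t', 'т'), ('u', 'у'),
--     ('f', 'ф'), ('h', 'х'), ('c', 'ц'), ('j', 'дж'),
--     ('q', 'к'), ('x', 'кс'), ('w', 'в'), ("'", 'ь'),
--     ('"', 'ъ'),
-- ]
-- _TABLE = dict(_PAIRS)
--
-- def transliterate_word(word: str) -> str:
--     lower = word.lower()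
--     n = len(word)
--     out = []
--     pos = 0
--     while pos < n:
--         step = None
--         for L in range(min(4, n - pos), 0, -1):
--             v = _TABLE.get(lower[pos:pos + L])
--             if v is not None:
--                 step = (L, v)
--                 break
--         if step is None:
--             out.append(word[pos])   # original-case character
--             pos += 1
--         else:
--             out.append(step[1])
--             pos += step[0]
--     return ''.join(out)
-- ===== Notes on version B (the rewrite author's own statement) =====
-- stated objective: faster
-- what changed: A rebuilds and length-sorts the 41-pair list and linearly scans it at every position, recomputing word.lower() for each startswith test; B lowers the word once, builds a dict keyed by the latin substrings, and per position probes it with the lowered slice for candidate lengths 4 down to 1, falling back to the original-case character.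
import Mathlib
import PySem

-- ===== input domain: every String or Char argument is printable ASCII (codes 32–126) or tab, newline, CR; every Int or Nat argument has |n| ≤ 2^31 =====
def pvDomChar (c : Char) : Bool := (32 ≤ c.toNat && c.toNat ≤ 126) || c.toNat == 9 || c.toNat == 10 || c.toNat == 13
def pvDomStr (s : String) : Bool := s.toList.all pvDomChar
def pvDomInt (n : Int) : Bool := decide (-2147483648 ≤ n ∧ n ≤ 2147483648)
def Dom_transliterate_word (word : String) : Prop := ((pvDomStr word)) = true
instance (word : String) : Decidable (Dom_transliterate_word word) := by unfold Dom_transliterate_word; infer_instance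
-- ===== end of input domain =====

-- B lowers the word once and replaces A's per-position scan of a length-sorted pair list (which
-- re-lowers the word per test) with a dict probed by candidate length, longest first (objective: faster).

-- ===== PORT A =====
-- the module helper, as Python string pairs
def create_translit_mapping : List (String × String) := [
  ("shch", "щ"), ("sch", "щ"), ("ch", "ч"), ("zh", "ж"),
  ("kh", "х"), ("ts", "ц"), ("yu", "ю"), ("ya", "я"),
  ("yo", "ё"), ("sh", "ш"), ("je", "ж"), ("ii", "ый"),
  ("iy", "ий"), ("a", "а"), ("b", "б"), ("v", "в"),
  ("g", "г"), ("d", "д"), ("e", "е"), ("z", "з"),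
  ("i", "и"), ("y", "й"), ("k", "к"), ("l", "л"),
  ("m", "м"), ("n", "н"), ("o", "о"), ("p", "п"),
  ("r", "р"), ("s", "с"), ("t", "т"), ("u", "у"),
  ("f", "ф"), ("h", "х"), ("c", "ц"), ("j", "дж"),
  ("q", "к"), ("x", "кс"), ("w", "в"), ("'", "ь"),
  ("\"", "ъ")
]

-- mapping.sort(key=lambda x: (-len(x[0]), x[0]))
def pvSortedMapping : List (String × String) :=
  PySem.List.sorted2 create_translit_mapping (fun p => -(p.1.toList.length : Int)) (fun p => p.1.toList)  -- string tie-break key compared as its code points (= Python's str '<')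

-- the inner 'for key, value in mapping: if word.lower().startswith(key, pos): break'
-- (startswith(key, pos) with 0 ≤ pos ≤ len is exactly startswith on the suffix from pos)
def pvAFind (w : List Char) (pos : Nat) : Option (String × String) :=
  pvSortedMapping.find? (fun p => PySem.Chars.startswith ((PySem.Chars.lower w).drop pos) p.1.toList)

-- the 'while pos < len(word)' loop; fuel = remaining length bound (each step advances ≥ 1);
-- result strings are appended flat (''.join of the appended pieces); w.getD is in range under the guard
def pvLoopA (w : List Char) : Nat → Nat → List Char → List Char
  | 0, _, acc => acc
  | fuel + 1, pos, acc =>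
    if pos < w.length then
      match pvAFind w pos with
      | some (k, v) => pvLoopA w fuel (pos + k.toList.length) (acc ++ v.toList)
      | none => pvLoopA w fuel (pos + 1) (acc ++ [w.getD pos ' '])
    else acc

def transliterate_word (word : String) : String :=
  String.ofList (pvLoopA word.toList word.toList.length 0 [])

-- ===== PORT B =====
-- _TABLE = dict(_PAIRS): latin substring → cyrillic value, insertion order
def pvTable : PySem.Dict (List Char) (List Char) := PySem.Dict.ofList [
  (['s', 'h', 'c', 'h'], ['щ']), (['s', 'c', 'h'], ['щ']), (['c', 'h'], ['ч']), (['z', 'h'], ['ж']),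
  (['k', 'h'], ['х']), (['t', 's'], ['ц']), (['y', 'u'], ['ю']), (['y', 'a'], ['я']),
  (['y', 'o'], ['ё']), (['s', 'h'], ['ш']), (['j', 'e'], ['ж']), (['i', 'i'], ['ы', 'й']),
  (['i', 'y'], ['и', 'й']), (['a'], ['а']), (['b'], ['б']), (['v'], ['в']),
  (['g'], ['г']), (['d'], ['д']), (['e'], ['е']), (['z'], ['з']),
  (['i'], ['и']), (['y'], ['й']), (['k'], ['к']), (['l'], ['л']),
  (['m'], ['м']), (['n'], ['н']), (['o'], ['о']), (['p'], ['п']),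
  (['r'], ['р']), (['s'], ['с']), (['t'], ['т']), (['u'], ['у']),
  (['f'], ['ф']), (['h'], ['х']), (['c'], ['ц']), (['j'], ['д', 'ж']),
  (['q'], ['к']), (['x'], ['к', 'с']), (['w'], ['в']), (['\''], ['ь']),
  (['\"'], ['ъ'])
]

-- 'for L in range(min(4, n - pos), 0, -1): v = _TABLE.get(lower[pos:pos+L]); if v is not None: step = (L, v); break'
-- 'v = _TABLE.get(s); if v is not None: (L, v); break' — the found value, else the next length
def pvTryLens (lw : List Char) (pos : Nat) : Nat → Option (Nat × List Char)
  | 0 => none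
  | L + 1 =>
    ((pvTable.get? (PySem.List.slice lw (some (pos : Int)) (some ((pos + (L + 1) : Nat) : Int)))).map
        (fun v => (L + 1, v))).or (pvTryLens lw pos L)

-- the 'while pos < n' loop of B; fuel as in A's port; out pieces appended flat
def pvLoopB (w lw : List Char) : Nat → Nat → List Char → List Char
  | 0, _, acc => acc
  | fuel + 1, pos, acc =>
    if pos < w.length then
      match pvTryLens lw pos (min 4 (w.length - pos)) with
      | some (L, v) => pvLoopB w lw fuel (pos + L) (acc ++ v)
      | none => pvLoopB w lw fuel (pos + 1) (acc ++ [w.getD pos ' '])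
    else acc

def transliterate_word_alt (word : String) : String :=
  String.ofList (pvLoopB word.toList (PySem.Chars.lower word.toList) word.toList.length 0 [])

-- ===== PRECONDITION & SPEC =====
def Spec_transliterate_word (word : String) (out : String) : Prop := out = transliterate_word_alt word
instance (word : String) (out : String) : Decidable (Spec_transliterate_word word out) := by unfold Spec_transliterate_word; infer_instance

-- ===== CLAIM (what is proved, stated in full; the proofs are below) =====
def Claim_equal_transliterate_word : Prop := ∀ (word : String), Dom_transliterate_word word → Spec_transliterate_word word (transliterate_word word)

-- ===== LEMMAS AND PROOFS =====

-- A's sorted mapping, at the char-list level, grouped by key length (longest first)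
def pvG4 : List (List Char × List Char) := [(['s', 'h', 'c', 'h'], ['щ'])]
def pvG3 : List (List Char × List Char) := [(['s', 'c', 'h'], ['щ'])]
def pvG2 : List (List Char × List Char) := [(['c', 'h'], ['ч']), (['i', 'i'], ['ы', 'й']), (['i', 'y'], ['и', 'й']), (['j', 'e'], ['ж']), (['k', 'h'], ['х']), (['s', 'h'], ['ш']), (['t', 's'], ['ц']), (['y', 'a'], ['я']), (['y', 'o'], ['ё']), (['y', 'u'], ['ю']), (['z', 'h'], ['ж'])]
def pvG1 : List (List Char × List Char) := [(['\"'], ['ъ']), (['\''], ['ь']), (['a'], ['а']), (['b'], ['б']), (['c'], ['ц']), (['d'], ['д']), (['e'], ['е']), (['f'], ['ф']), (['g'], ['г']), (['h'], ['х']), (['i'], ['и']), (['j'], ['д', 'ж']), (['k'], ['к']), (['l'], ['л']), (['m'], ['м']), (['n'], ['н']), (['o'], ['о']), (['p'], ['п']), (['q'], ['к']), (['r'], ['р']), (['s'], ['с']), (['t'], ['т']), (['u'], ['у']), (['v'], ['в']), (['w'], ['в']), (['x'], ['к', 'с']), (['y'], ['й']), (['z'], ['з'])]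

set_option maxRecDepth 8000 in
lemma pvSorted_eq : pvSortedMapping.map (fun p => (p.1.toList, p.2.toList)) = pvG4 ++ pvG3 ++ pvG2 ++ pvG1 := by decide

-- first-match scan of an association list (proof-side normal form of both ports' lookups)
def pvChain (s : List Char) : List (List Char × List Char) → Option (List Char)
  | [] => none
  | (k, v) :: r => if s = k then some v else pvChain s r

lemma pvChain_perm {M M' : List (List Char × List Char)} (h : M.Perm M')
    (hnd : (M.map Prod.fst).Nodup) (s : List Char) : pvChain s M = pvChain s M' := by
  induction h with
  | nil => rfl
  | cons x _ ih =>
    simp only [List.map_cons, List.nodup_cons] at hnd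
    obtain ⟨x1, x2⟩ := x
    simp only [pvChain, ih hnd.2]
  | swap x y l =>
    obtain ⟨x1, x2⟩ := x; obtain ⟨y1, y2⟩ := y
    simp only [List.map_cons, List.nodup_cons, List.mem_cons] at hnd
    have hne : x1 ≠ y1 := fun h => hnd.1 (Or.inl h.symm)
    simp only [pvChain]
    by_cases h1 : s = y1 <;> by_cases h2 : s = x1 <;> simp_all
  | trans h12 _ ih1 ih2 =>
    rw [ih1 hnd, ih2 (((h12.map Prod.fst).nodup_iff).mp hnd)]

lemma pvChain_filter_len (s : List Char) (M : List (List Char × List Char)) :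
    pvChain s M = pvChain s (M.filter (fun p => p.1.length == s.length)) := by
  induction M with
  | nil => rfl
  | cons kv r ih =>
    obtain ⟨k, v⟩ := kv
    by_cases h : s = k
    · subst h
      simp [pvChain, List.filter]
    · by_cases hl : k.length = s.length
      · simp only [List.filter_cons, show (k.length == s.length) = true by simp [hl]]
        simp [pvChain, h, ih]
      · simp only [List.filter_cons, show (k.length == s.length) = false by simp [hl]]
        simp [pvChain, h, ih]

lemma pvChain_none_of_len {L : Nat} {M : List (List Char × List Char)}
    (hM : ∀ p ∈ M, p.1.length = L) {s : List Char} (hs : s.length ≠ L) :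
    pvChain s M = none := by
  induction M with
  | nil => rfl
  | cons kv r ih =>
    obtain ⟨k, v⟩ := kv
    have hk : k.length = L := hM (k, v) List.mem_cons_self
    have : s ≠ k := fun h => hs (h ▸ hk)
    simp only [pvChain, if_neg this]
    exact ih (fun p hp => hM p (List.mem_cons_of_mem _ hp))

lemma pvGet?_eq_chain (l : List (List Char × List Char)) (s : List Char) :
    (PySem.Dict.mk l).get? s = pvChain s l := by
  induction l with
  | nil => rfl
  | cons kv r ih =>
    obtain ⟨k, v⟩ := kv
    rw [PySem.Dict.get?_mk_cons, pvChain, ih]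
    by_cases h : s = k
    · simp [h]
    · simp [h, Ne.symm h]

set_option maxRecDepth 8000 in
lemma pvTable_mk : pvTable = PySem.Dict.mk [
  (['s', 'h', 'c', 'h'], ['щ']), (['s', 'c', 'h'], ['щ']), (['c', 'h'], ['ч']), (['z', 'h'], ['ж']),
  (['k', 'h'], ['х']), (['t', 's'], ['ц']), (['y', 'u'], ['ю']), (['y', 'a'], ['я']),
  (['y', 'o'], ['ё']), (['s', 'h'], ['ш']), (['j', 'e'], ['ж']), (['i', 'i'], ['ы', 'й']),
  (['i', 'y'], ['и', 'й']), (['a'], ['а']), (['b'], ['б']), (['v'], ['в']),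
  (['g'], ['г']), (['d'], ['д']), (['e'], ['е']), (['z'], ['з']),
  (['i'], ['и']), (['y'], ['й']), (['k'], ['к']), (['l'], ['л']),
  (['m'], ['м']), (['n'], ['н']), (['o'], ['о']), (['p'], ['п']),
  (['r'], ['р']), (['s'], ['с']), (['t'], ['т']), (['u'], ['у']),
  (['f'], ['ф']), (['h'], ['х']), (['c'], ['ц']), (['j'], ['д', 'ж']),
  (['q'], ['к']), (['x'], ['к', 'с']), (['w'], ['в']), (['\''], ['ь']),
  (['\"'], ['ъ'])] := by decide

-- B's table probed with a string of length L sees exactly the length-L group of A's sorted mapping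
set_option maxRecDepth 8000 in
lemma pvGet?_len1 (s : List Char) (h : s.length = 1) : pvTable.get? s = pvChain s pvG1 := by
  rw [pvTable_mk, pvGet?_eq_chain, pvChain_filter_len, h]
  exact pvChain_perm (by decide) (by decide) s
set_option maxRecDepth 8000 in
lemma pvGet?_len2 (s : List Char) (h : s.length = 2) : pvTable.get? s = pvChain s pvG2 := by
  rw [pvTable_mk, pvGet?_eq_chain, pvChain_filter_len, h]
  exact pvChain_perm (by decide) (by decide) s
set_option maxRecDepth 8000 in
lemma pvGet?_len3 (s : List Char) (h : s.length = 3) : pvTable.get? s = pvChain s pvG3 := by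
  rw [pvTable_mk, pvGet?_eq_chain, pvChain_filter_len, h]
  exact pvChain_perm (by decide) (by decide) s
set_option maxRecDepth 8000 in
lemma pvGet?_len4 (s : List Char) (h : s.length = 4) : pvTable.get? s = pvChain s pvG4 := by
  rw [pvTable_mk, pvGet?_eq_chain, pvChain_filter_len, h]
  exact pvChain_perm (by decide) (by decide) s

-- A's inner scan of a single length-L group, as a chain on the length-L prefix
lemma pvFind_group (L : Nat) (g : List (List Char × List Char))
    (hg : ∀ p ∈ g, p.1.length = L) (t : List Char) :
    ((g.find? (fun p => PySem.Chars.startswith t p.1)).map (fun p => (p.1.length, p.2))) =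
      (pvChain (t.take L) g).map (fun v => (L, v)) := by
  induction g with
  | nil => rfl
  | cons kv r ih =>
    obtain ⟨k, v⟩ := kv
    have hk : k.length = L := hg (k, v) List.mem_cons_self
    have ih' := ih (fun p hp => hg p (List.mem_cons_of_mem _ hp))
    by_cases hpre : k <+: t
    · have hsw : PySem.Chars.startswith t k = true := (PySem.Chars.startswith_iff t k).mpr hpre
      have htk : t.take L = k := by
        have := List.prefix_iff_eq_take.mp hpre
        rw [hk] at this; exact this.symm
      simp [hsw, pvChain, htk, hk]
    · have hsw : PySem.Chars.startswith t k = false := by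
        cases hb : PySem.Chars.startswith t k
        · rfl
        · exact absurd ((PySem.Chars.startswith_iff t k).mp hb) hpre
      have htk : t.take L ≠ k := by
        intro he
        exact hpre (he ▸ List.take_prefix L t)
      simp [hsw, pvChain, htk, ih']

def pvTryAux (t : List Char) : Nat → Option (Nat × List Char)
  | 0 => none
  | L + 1 => ((pvTable.get? (t.take (L + 1))).map (fun v => (L + 1, v))).or (pvTryAux t L)

set_option maxRecDepth 100000 in
lemma pvTryLens_eq_aux (lw : List Char) (pos : Nat) (m : Nat) :
    pvTryLens lw pos m = pvTryAux (lw.drop pos) m := by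
  induction m with
  | zero => rfl
  | succ L ih =>
    simp only [pvTryLens, pvTryAux, PySem.List.slice_natCast, Nat.add_sub_cancel_left, ih]

-- 'match get? with some v => some (L+1, v) | none => rest' as an Option.or
lemma pvTryAux_succ (t : List Char) (L : Nat) :
    pvTryAux t (L + 1) =
      ((pvTable.get? (t.take (L + 1))).map (fun v => (L + 1, v))).or (pvTryAux t L) := rfl

lemma pvMap_or {α β : Type} (f : α → β) (a b : Option α) :
    (a.or b).map f = (a.map f).or (b.map f) := by cases a <;> rfl

-- the per-position step: A's scan and B's length-descending probes pick the same match
set_option maxRecDepth 100000 in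
lemma pvStep_eq (t : List Char) :
    ((pvSortedMapping.find? (fun p => PySem.Chars.startswith t p.1.toList)).map
        (fun p => (p.1.toList.length, p.2.toList))) =
      pvTryAux t (min 4 t.length) := by
  have hA : ((pvSortedMapping.find? (fun p => PySem.Chars.startswith t p.1.toList)).map
        (fun p => (p.1.toList.length, p.2.toList))) =
      (((pvChain (t.take 4) pvG4).map (fun v => (4, v))).or
        (((pvChain (t.take 3) pvG3).map (fun v => (3, v))).or
          (((pvChain (t.take 2) pvG2).map (fun v => (2, v))).or
            ((pvChain (t.take 1) pvG1).map (fun v => (1, v)))))) := by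
    have hm : (pvG4 ++ pvG3 ++ pvG2 ++ pvG1).find? (fun q => PySem.Chars.startswith t q.1) =
        Option.map (fun p => (p.1.toList, p.2.toList))
          (pvSortedMapping.find? (fun p => PySem.Chars.startswith t p.1.toList)) := by
      rw [← pvSorted_eq, List.find?_map]
      rfl
    have hexp := congrArg (Option.map (fun (q : List Char × List Char) => (q.1.length, q.2))) hm
    rw [Option.map_map] at hexp
    have : ((pvG4 ++ pvG3 ++ pvG2 ++ pvG1).find? (fun q => PySem.Chars.startswith t q.1)).map
        (fun (q : List Char × List Char) => (q.1.length, q.2)) =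
        ((pvSortedMapping.find? (fun p => PySem.Chars.startswith t p.1.toList)).map
          (fun p => (p.1.toList.length, p.2.toList))) := hexp
    rw [← this]
    simp only [List.find?_append, pvMap_or, Option.or_assoc]
    rw [pvFind_group 4 pvG4 (by decide) t, pvFind_group 3 pvG3 (by decide) t,
      pvFind_group 2 pvG2 (by decide) t, pvFind_group 1 pvG1 (by decide) t]
  rw [hA]
  rcases t with _ | ⟨a, _ | ⟨b, _ | ⟨c, _ | ⟨d, r⟩⟩⟩⟩
  · rw [pvChain_none_of_len (L := 4) (by decide) (by simp),
      pvChain_none_of_len (L := 3) (by decide) (by simp),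
      pvChain_none_of_len (L := 2) (by decide) (by simp),
      pvChain_none_of_len (L := 1) (by decide) (by simp)]
    rfl
  · rw [pvChain_none_of_len (L := 4) (by decide) (by simp),
      pvChain_none_of_len (L := 3) (by decide) (by simp),
      pvChain_none_of_len (L := 2) (by decide) (by simp),
      show (min 4 ([a].length)) = 1 from by simp,
      pvTryAux_succ, pvGet?_len1 _ (by simp)]
    simp [pvTryAux]
  · rw [pvChain_none_of_len (L := 4) (by decide) (by simp),
      pvChain_none_of_len (L := 3) (by decide) (by simp),
      show (min 4 ([a, b].length)) = 2 from by simp,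
      pvTryAux_succ, pvTryAux_succ, pvGet?_len2 _ (by simp), pvGet?_len1 _ (by simp)]
    simp [pvTryAux]
  · rw [pvChain_none_of_len (L := 4) (by decide) (by simp),
      show (min 4 ([a, b, c].length)) = 3 from by simp,
      pvTryAux_succ, pvTryAux_succ, pvTryAux_succ,
      pvGet?_len3 _ (by simp), pvGet?_len2 _ (by simp), pvGet?_len1 _ (by simp)]
    simp [pvTryAux]
  · rw [show (min 4 ((a :: b :: c :: d :: r).length)) = 4 from by simp,
      pvTryAux_succ, pvTryAux_succ, pvTryAux_succ, pvTryAux_succ,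
      pvGet?_len4 _ (by simp), pvGet?_len3 _ (by simp), pvGet?_len2 _ (by simp),
      pvGet?_len1 _ (by simp)]
    simp [pvTryAux]

set_option maxRecDepth 100000 in
lemma pvLoop_eq (w : List Char) : ∀ fuel pos acc,
    pvLoopA w fuel pos acc = pvLoopB w (PySem.Chars.lower w) fuel pos acc := by
  intro fuel
  induction fuel with
  | zero => intro pos acc; rfl
  | succ fuel ih =>
    intro pos acc
    simp only [pvLoopA, pvLoopB]
    by_cases hp : pos < w.length
    · simp only [hp, if_true]
      have hlw : (PySem.Chars.lower w).length = w.length := by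
        simp [PySem.Chars.lower]
      have hrel : pvTryLens (PySem.Chars.lower w) pos (min 4 (w.length - pos)) =
          pvTryAux ((PySem.Chars.lower w).drop pos) (min 4 ((PySem.Chars.lower w).drop pos).length) := by
        rw [pvTryLens_eq_aux]
        congr 2
        simp [hlw]
      have hstep := pvStep_eq ((PySem.Chars.lower w).drop pos)
      cases hfind : pvAFind w pos with
      | none =>
        have : pvTryLens (PySem.Chars.lower w) pos (min 4 (w.length - pos)) = none := by
          rw [hrel, ← hstep]
          unfold pvAFind at hfind
          rw [hfind]
          rfl
        rw [this]
        exact ih (pos + 1) (acc ++ [w.getD pos ' '])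
      | some p =>
        obtain ⟨k, v⟩ := p
        have : pvTryLens (PySem.Chars.lower w) pos (min 4 (w.length - pos)) =
            some (k.toList.length, v.toList) := by
          rw [hrel, ← hstep]
          unfold pvAFind at hfind
          rw [hfind]
          rfl
        rw [this]
        exact ih (pos + k.toList.length) (acc ++ v.toList)
    · simp [hp]

-- ===== VERDICT (by name: the statement is the Claim_ definition above) =====
theorem transliterate_word_spec : Claim_equal_transliterate_word := by
  intro word _
  unfold Spec_transliterate_word transliterate_word transliterate_word_alt
  rw [pvLoop_eq]
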